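-- pv_equiv track=rewrite | github.com/viktoriaDEVV/AOIS | lab1/run.py | additional_to_reverse
-- ===== SOURCE A (Python) =====
-- def additional_to_reverse(binary_number):
--     if binary_number[0] == '1':
--         result_number = []
--         carry = 1
--         for bit in reversed(binary_number):
--             if bit == '1' and carry == 1:
--                 result_number.append('0')  # 1 - 1 = 0
--                 carry = 0
--             elif bit == '0' and carry == 1:
--                 result_number.append('1')
--                 carry = 1
--             else:
--                 result_number.append(bit)
--         return ''.join(reversed(result_number))
--     else:
--         return binary_number
-- ===== SOURCE B (Python) =====
-- def _borrow(rev):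
--     # rev is the number reversed: flip trailing '0's to '1', the first '1' to '0', stop there
--     if not rev:
--         return ''
--     c, rest = rev[0], rev[1:]
--     if c == '1':
--         return '0' + rest
--     if c == '0':
--         return '1' + _borrow(rest)
--     return c + _borrow(rest)
--
--
-- def additional_to_reverse(binary_number):
--     if binary_number.startswith('1'):
--         return _borrow(binary_number[::-1])[::-1]
--     return binary_number
-- ===== Notes on version B (the rewrite author's own statement) =====
-- stated objective: simpler
-- what changed: Replaces A's full right-to-left scan carrying a borrow flag (building a list, then reversing and joining it) by an early-stopping structural recursion on the reversed string: flip each trailing zero bit to a one, flip the first one bit to a zero, and keep the remaining prefix untouched.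
import Mathlib
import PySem

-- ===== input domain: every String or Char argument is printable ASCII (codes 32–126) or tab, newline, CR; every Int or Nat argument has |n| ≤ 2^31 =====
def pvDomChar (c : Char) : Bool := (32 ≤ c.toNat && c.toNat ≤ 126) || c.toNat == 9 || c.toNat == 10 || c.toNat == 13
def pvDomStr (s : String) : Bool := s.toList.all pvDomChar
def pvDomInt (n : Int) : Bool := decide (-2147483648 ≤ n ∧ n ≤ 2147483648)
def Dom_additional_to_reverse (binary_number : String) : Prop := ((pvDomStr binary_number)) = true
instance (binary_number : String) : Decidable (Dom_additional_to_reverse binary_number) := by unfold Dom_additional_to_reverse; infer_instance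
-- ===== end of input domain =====

-- B replaces A's full right-to-left scan with a carry flag by an early-stopping
-- structural recursion on the reversed string (flip trailing '0's, flip the first '1', keep the rest);
-- objective: simpler.


-- ===== PORT A =====
def additional_to_reverse (binary_number : String) : String :=
  match PySem.Str.pyGet? binary_number 0 with
  | some c =>
    if c = '1' then
      -- result_number/carry loop over reversed(binary_number), then ''.join(reversed(result_number))
      let st := binary_number.toList.reverse.foldl
        (fun (acc : List Char × Int) bit =>
          if bit = '1' ∧ acc.2 = 1 then (acc.1 ++ ['0'], 0)
          else if bit = '0' ∧ acc.2 = 1 then (acc.1 ++ ['1'], 1)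
          else (acc.1 ++ [bit], acc.2)) ([], 1)
      String.ofList st.1.reverse
    else binary_number
  | none => binary_number  -- binary_number[0] raises IndexError here; excluded by Pre_

-- ===== PORT B =====
def pvBorrow : List Char → List Char
  | [] => []
  | c :: rest =>
    if c = '1' then '0' :: rest
    else if c = '0' then '1' :: pvBorrow rest
    else c :: pvBorrow rest

def additional_to_reverse_alt (binary_number : String) : String :=
  if PySem.Str.startswith binary_number "1" then
    -- binary_number[::-1] is list reverse (PySem.Str.slice?_none_none_neg_one), twice
    String.ofList (pvBorrow binary_number.toList.reverse).reverse
  else binary_number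

-- ===== PRECONDITION & SPEC =====
-- Pre_ excludes only the empty string, on which A raises IndexError (binary_number[0]).
def Pre_additional_to_reverse (binary_number : String) : Prop := binary_number.toList ≠ []
instance (binary_number : String) : Decidable (Pre_additional_to_reverse binary_number) := by unfold Pre_additional_to_reverse; infer_instance
def pvWitness_additional_to_reverse : String := "10"

def Spec_additional_to_reverse (binary_number : String) (out : String) : Prop := out = additional_to_reverse_alt binary_number
instance (binary_number : String) (out : String) : Decidable (Spec_additional_to_reverse binary_number out) := by unfold Spec_additional_to_reverse; infer_instance

-- ===== CLAIM (what is proved, stated in full; the proofs are below) =====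
def Claim_equal_additional_to_reverse : Prop := ∀ (binary_number : String), Dom_additional_to_reverse binary_number → Pre_additional_to_reverse binary_number → Spec_additional_to_reverse binary_number (additional_to_reverse binary_number)

-- ===== LEMMAS AND PROOFS =====
lemma pvFold0 (l acc : List Char) :
    l.foldl (fun (a : List Char × Int) bit =>
      if bit = '1' ∧ a.2 = 1 then (a.1 ++ ['0'], 0)
      else if bit = '0' ∧ a.2 = 1 then (a.1 ++ ['1'], 1)
      else (a.1 ++ [bit], a.2)) (acc, 0) = (acc ++ l, 0) := by
  induction l generalizing acc with
  | nil => simp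
  | cons c t ih => simpa using ih (acc ++ [c])

lemma pvFold1 (l acc : List Char) :
    (l.foldl (fun (a : List Char × Int) bit =>
      if bit = '1' ∧ a.2 = 1 then (a.1 ++ ['0'], 0)
      else if bit = '0' ∧ a.2 = 1 then (a.1 ++ ['1'], 1)
      else (a.1 ++ [bit], a.2)) (acc, 1)).1 = acc ++ pvBorrow l := by
  induction l generalizing acc with
  | nil => simp [pvBorrow]
  | cons c t ih =>
    by_cases hc1 : c = '1'
    · simp [hc1, pvBorrow, pvFold0]
    · by_cases hc0 : c = '0'
      · simpa [hc1, hc0, pvBorrow] using ih (acc ++ ['1'])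
      · simpa [hc1, hc0, pvBorrow] using ih (acc ++ [c])

-- ===== VERDICT (by name: the statement is the Claim_ definition above) =====
theorem additional_to_reverse_spec : Claim_equal_additional_to_reverse := by
  intro s _ hpre
  unfold Spec_additional_to_reverse additional_to_reverse additional_to_reverse_alt
  rcases hl : s.toList with _ | ⟨c, t⟩
  · exact absurd hl hpre
  · have hget : PySem.Str.pyGet? s 0 = some c := by
      simp [hl]
    rw [hget]
    dsimp only
    by_cases hc : c = '1'
    · rw [if_pos hc]
      have hb : PySem.Str.startswith s "1" = true := by
        rw [PySem.Str.startswith_eq]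
        exact (PySem.Chars.startswith_iff _ _).2 (by simp [hl, hc])
      simp only [hb, if_pos]
      rw [pvFold1]
      simp
    · rw [if_neg hc]
      have hb : PySem.Str.startswith s "1" = false := by
        rw [PySem.Str.startswith_eq, Bool.eq_false_iff]
        intro h
        rcases (PySem.Chars.startswith_iff _ _).1 h with ⟨rest, hr⟩
        rw [hl] at hr
        simp at hr
        exact hc hr.1.symm
      simp only [hb, Bool.false_eq_true, if_false]
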